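-- pv_equiv track=rewrite | github.com/emmettbutler/ctci | q1_7rotatematrix.py | ringCoords
-- ===== SOURCE A (Python) =====
-- def ringCoords(N, idxring):
--     """Nastiest part of the attempt, and probably the reason that the solution is
--     preferable. Generating an ordered sequence of the coordinates in a layer is hard to
--     reduce to code simpler than this.
--     """
--     first = idxring
--     last = N - idxring - 1
--     for x in range(first, last):
--         yield (x, first)
--     for y in range(first, last):
--         yield (last, y)
--     for x in reversed(range(first + 1, last + 1)):
--         yield (x, last)
--     for y in reversed(range(first + 1, last + 1)):
--         yield (first, y)
-- ===== SOURCE B (Python) =====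
-- def ringCoords(N, idxring):
--     first = idxring
--     last = N - idxring - 1
--     s = last - first
--     for t in range(4 * s):
--         side, k = divmod(t, s)
--         if side == 0:
--             yield (first + k, first)
--         elif side == 1:
--             yield (last, first + k)
--         elif side == 2:
--             yield (last - k, last)
--         else:
--             yield (first, last - k)
-- ===== Notes on version B (the rewrite author's own statement) =====
-- stated objective: alternative
-- what changed: Replaces A's four staged side loops by a single loop over the perimeter position t in range(4*s) with a closed-form divmod decoding of t into (side, offset) and an arithmetic formula for the coordinate.
import Mathlib
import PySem

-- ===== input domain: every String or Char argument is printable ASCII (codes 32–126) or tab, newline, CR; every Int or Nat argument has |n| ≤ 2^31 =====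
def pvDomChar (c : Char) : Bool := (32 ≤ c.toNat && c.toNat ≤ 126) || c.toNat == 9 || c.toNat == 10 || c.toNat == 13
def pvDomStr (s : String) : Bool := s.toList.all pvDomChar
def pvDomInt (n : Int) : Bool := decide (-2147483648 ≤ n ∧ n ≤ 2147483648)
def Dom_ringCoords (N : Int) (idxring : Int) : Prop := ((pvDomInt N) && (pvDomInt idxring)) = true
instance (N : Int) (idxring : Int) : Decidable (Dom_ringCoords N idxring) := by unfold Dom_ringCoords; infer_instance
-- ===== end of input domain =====

-- B replaces A's four staged side loops by one loop over the perimeter position t in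
-- range(4*s), decoding t by divmod into (side, offset) and computing the coordinate by
-- an arithmetic formula (objective: alternative, same cost).

-- ===== PORT A =====
-- A is a generator of the four sides' coordinates; ported as the concatenation of the four
-- yielded ranges, in order.
def ringCoords (N : Int) (idxring : Int) : List (Int × Int) :=
  let first := idxring
  let last := N - idxring - 1
  (PySem.List.pyRange first last 1).map (fun x => (x, first)) ++
  (PySem.List.pyRange first last 1).map (fun y => (last, y)) ++
  ((PySem.List.pyRange (first + 1) (last + 1) 1).reverse).map (fun x => (x, last)) ++
  ((PySem.List.pyRange (first + 1) (last + 1) 1).reverse).map (fun y => (first, y))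

-- ===== PORT B =====
-- the body of B's single loop: side, k = divmod(t, s), then the coordinate formula.
-- divmod is only reached with s > 0 (the range is empty otherwise), so floordiv/mod are exact.
def decodeRing (first last s t : Int) : Int × Int :=
  let side := PySem.Int.floordiv t s
  let k := PySem.Int.mod t s
  if side = 0 then (first + k, first)
  else if side = 1 then (last, first + k)
  else if side = 2 then (last - k, last)
  else (first, last - k)

def ringCoords_alt (N : Int) (idxring : Int) : List (Int × Int) :=
  let first := idxring
  let last := N - idxring - 1
  let s := last - first
  (PySem.List.pyRange 0 (4 * s) 1).map (decodeRing first last s)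

-- ===== PRECONDITION & SPEC =====
def Spec_ringCoords (N : Int) (idxring : Int) (out : List (Int × Int)) : Prop := out = ringCoords_alt N idxring
instance (N : Int) (idxring : Int) (out : List (Int × Int)) : Decidable (Spec_ringCoords N idxring out) := by unfold Spec_ringCoords; infer_instance

-- ===== CLAIM (what is proved, stated in full; the proofs are below) =====
def Claim_equal_ringCoords : Prop := ∀ (N : Int) (idxring : Int), Dom_ringCoords N idxring → Spec_ringCoords N idxring (ringCoords N idxring)

-- ===== LEMMAS AND PROOFS =====

-- decoding t = j*s + k with 0 ≤ k < s gives side j, offset k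
theorem decodeRing_decompose (first last s : Int) (j k : Int)
    (hs : 0 < s) (hk0 : 0 ≤ k) (hks : k < s) :
    PySem.Int.floordiv (j * s + k) s = j ∧ PySem.Int.mod (j * s + k) s = k := by
  rw [PySem.Int.floordiv_eq_ediv_of_pos hs, PySem.Int.mod_eq_emod_of_pos hs,
    show j * s + k = k + j * s by ring]
  have hdiv : (k + j * s) / s = j := by
    rw [Int.add_mul_ediv_right _ _ (ne_of_gt hs), Int.ediv_eq_zero_of_lt hk0 hks, zero_add]
  refine ⟨hdiv, ?_⟩
  rw [Int.emod_def, hdiv]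
  ring

-- ===== VERDICT (by name: the statement is the Claim_ definition above) =====
theorem ringCoords_spec : Claim_equal_ringCoords := by
  intro N idxring _
  simp only [Spec_ringCoords, ringCoords, ringCoords_alt]
  set first := idxring with hf
  set last := N - idxring - 1 with hl
  by_cases hs : last - first ≤ 0
  · rw [PySem.List.pyRange_one_eq_nil (by omega : last ≤ first),
      PySem.List.pyRange_one_eq_nil (by omega : last + 1 ≤ first + 1),
      PySem.List.pyRange_one_eq_nil (by omega : 4 * (last - first) ≤ 0)]
    simp
  · push_neg at hs
    have h4 : (0:Int) ≤ last - first := le_of_lt hs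
    set s := last - first with hsdef
    -- split range(0, 4*s) at s, 2*s, 3*s
    rw [PySem.List.pyRange_one_append 0 s (4*s) (by omega) (by omega),
      PySem.List.pyRange_one_append s (2*s) (4*s) (by omega) (by omega),
      PySem.List.pyRange_one_append (2*s) (3*s) (4*s) (by omega) (by omega)]
    rw [← PySem.List.pyRange_neg_one_eq_reverse, PySem.List.pyRange_neg_one,
      PySem.List.pyRange_one, PySem.List.pyRange_one, PySem.List.pyRange_one,
      PySem.List.pyRange_one, PySem.List.pyRange_one]
    simp only [List.map_append, List.map_map, List.append_assoc]
    rw [show s - 0 = s by ring, show 2 * s - s = s by ring, show 3 * s - 2 * s = s by ring,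
      show 4 * s - 3 * s = s by ring]
    congr 1
    · refine List.map_congr_left fun m hm => ?_
      have h0 := decodeRing_decompose first last s 0 (m : Int) hs (by omega)
        (by simp only [List.mem_range] at hm; omega)
      simp only [zero_mul, zero_add] at h0
      simp only [Function.comp_apply, decodeRing, zero_add, h0.1, h0.2]
      norm_num
    congr 1
    · refine List.map_congr_left fun m hm => ?_
      have h1 := decodeRing_decompose first last s 1 (m : Int) hs (by omega)
        (by simp only [List.mem_range] at hm; omega)
      simp only [one_mul] at h1
      simp only [Function.comp_apply, decodeRing, h1.1, h1.2]
      norm_num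
    congr 1
    · refine List.map_congr_left fun m hm => ?_
      have h2 := decodeRing_decompose first last s 2 (m : Int) hs (by omega)
        (by simp only [List.mem_range] at hm; omega)
      simp only [Function.comp_apply, decodeRing, h2.1, h2.2]
      norm_num
    · refine List.map_congr_left fun m hm => ?_
      have h3 := decodeRing_decompose first last s 3 (m : Int) hs (by omega)
        (by simp only [List.mem_range] at hm; omega)
      simp only [Function.comp_apply, decodeRing, h3.1, h3.2]
      norm_num
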